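-- pv_equiv track=rewrite | github.com/MrBrantCode/unitest_baseline | mut_generate/mist_train_taco/taco_8230/solution.py | max_possible_gcd
-- ===== SOURCE A (Python) =====
-- from math import gcd
--
-- def max_possible_gcd(N, A):
--     def segfunc(x, y):
--         return gcd(x, y)
--
--     ide_ele = 0
--
--     class SegTree:
--         def __init__(self, init_val, segfunc, ide_ele):
--             n = len(init_val)
--             self.segfunc = segfunc
--             self.ide_ele = ide_ele
--             self.num = 1 << (n - 1).bit_length()
--             self.tree = [ide_ele] * 2 * self.num
--             for i in range(n):
--                 self.tree[self.num + i] = init_val[i]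
--             for i in range(self.num - 1, 0, -1):
--                 self.tree[i] = self.segfunc(self.tree[2 * i], self.tree[2 * i + 1])
--
--         def update(self, k, x):
--             k += self.num
--             self.tree[k] = x
--             while k > 1:
--                 self.tree[k >> 1] = self.segfunc(self.tree[k], self.tree[k ^ 1])
--                 k >>= 1
--
--         def query(self, l, r):
--             res = self.ide_ele
--             l += self.num
--             r += self.num
--             while l < r:
--                 if l & 1:
--                     res = self.segfunc(res, self.tree[l])
--                     l += 1
--                 if r & 1:
--                     res = self.segfunc(res, self.tree[r - 1])
--                 l >>= 1
--                 r >>= 1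
--             return res
--
--     seg = SegTree(A, segfunc, ide_ele)
--     ans = 1
--     for i in range(N):
--         seg.update(i, 0)
--         ans = max(ans, seg.query(0, N))
--         seg.update(i, A[i])
--
--     return ans
-- ===== SOURCE B (Python) =====
-- from math import gcd
--
-- def max_possible_gcd(N, A):
--     # prefix/suffix gcd arrays: pre[i] = gcd(A[0..i-1]), suf[i] = gcd(A[i..N-1])
--     pre = [0] * (N + 1)
--     for i in range(N):
--         pre[i + 1] = gcd(pre[i], A[i])
--     suf = [0] * (N + 1)
--     for i in range(N - 1, -1, -1):
--         suf[i] = gcd(suf[i + 1], A[i])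
--     ans = 1
--     for i in range(N):
--         ans = max(ans, gcd(pre[i], suf[i + 1]))
--     return ans
-- ===== Notes on version B (the rewrite author's own statement) =====
-- stated objective: faster
-- what changed: Replaced the segment tree (build + per-index point-update/range-query/restore) by prefix/suffix gcd arrays combined per index.
import Mathlib
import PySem

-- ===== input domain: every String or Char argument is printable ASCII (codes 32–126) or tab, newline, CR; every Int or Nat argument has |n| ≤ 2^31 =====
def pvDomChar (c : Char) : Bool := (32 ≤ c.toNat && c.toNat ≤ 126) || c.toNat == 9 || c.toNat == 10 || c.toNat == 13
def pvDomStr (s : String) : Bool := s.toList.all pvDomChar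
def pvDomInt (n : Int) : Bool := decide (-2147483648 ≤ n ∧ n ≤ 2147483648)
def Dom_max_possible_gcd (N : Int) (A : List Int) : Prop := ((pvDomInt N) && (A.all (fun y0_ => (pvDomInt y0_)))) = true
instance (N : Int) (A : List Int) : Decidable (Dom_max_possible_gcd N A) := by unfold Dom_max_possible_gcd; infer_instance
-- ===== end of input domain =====

-- B replaces A's segment tree (build + per-index update/query/restore) by prefix/suffix gcd arrays;
-- equivalence is proved on Pre_ (N ≤ len(A)); outside it both Pythons raise IndexError.

-- ===== PORT A =====
-- math.gcd: nonnegative gcd of absolute values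
def pyGcd (x y : Int) : Int := Int.gcd x y

-- Python int.bit_length of a nonnegative n (callers pass |n|, as Python's bit_length ignores sign)
def pyBitLength (m : Nat) : Nat := if m = 0 then 0 else Nat.log2 m + 1

-- `for i in range(n): tree[num+i] = init_val[i]` over `[ide_ele]*2*num`
def segBuildLeaves (A : List Int) (num : Nat) : List Int :=
  (List.range A.length).foldl (fun t i => t.set (num + i) (A.getD i 0)) (List.replicate (2 * num) 0)

-- `for i in range(num-1, 0, -1): tree[i] = segfunc(tree[2i], tree[2i+1])`; called with num-1
def segBuildLoop (t : List Int) : Nat → List Int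
  | 0 => t
  | i + 1 => segBuildLoop (t.set (i + 1) (pyGcd (t.getD (2 * (i + 1)) 0) (t.getD (2 * (i + 1) + 1) 0))) i

-- `while k > 1: tree[k >> 1] = segfunc(tree[k], tree[k ^ 1]); k >>= 1`
def segUpdLoop (t : List Int) (k : Nat) : List Int :=
  if h : 1 < k then
    segUpdLoop (t.set (k / 2) (pyGcd (t.getD k 0) (t.getD (k ^^^ 1) 0))) (k / 2)
  else t
termination_by k
decreasing_by exact Nat.div_lt_self (Nat.lt_of_lt_of_le Nat.zero_lt_one (Nat.le_of_lt h)) Nat.one_lt_two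

-- update(k, x): k += num; tree[k] = x; then the while loop
def segUpdate (num : Nat) (t : List Int) (k : Nat) (x : Int) : List Int :=
  segUpdLoop (t.set (k + num) x) (k + num)

-- query's while loop (l, r already offset by num)
def segQLoop (t : List Int) (res : Int) (l r : Nat) : Int :=
  if h : l < r then
    let p := if l % 2 = 1 then (pyGcd res (t.getD l 0), l + 1) else (res, l)
    let res2 := if r % 2 = 1 then pyGcd p.1 (t.getD (r - 1) 0) else p.1
    segQLoop t res2 (p.2 / 2) (r / 2)
  else res
termination_by r
decreasing_by exact Nat.div_lt_self (Nat.lt_of_le_of_lt (Nat.zero_le _) h) Nat.one_lt_two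

def max_possible_gcd (N : Int) (A : List Int) : Int :=
  let n := A.length
  let num := 2 ^ pyBitLength ((n : Int) - 1).natAbs
  let tree := segBuildLoop (segBuildLeaves A num) (num - 1)
  -- for i in range(N): range(N) = 0,…,N-1 (empty for N ≤ 0); A[i] is in range under Pre_
  ((List.range N.toNat).foldl
    (fun (st : List Int × Int) i =>
      let t1 := segUpdate num st.1 i 0
      let a := max st.2 (segQLoop t1 0 (0 + num) (N.toNat + num))
      let t2 := segUpdate num t1 i (A.getD i 0)
      (t2, a))
    (tree, 1)).2

-- ===== PORT B =====
-- Source B: pre[i] = gcd of A[0..i-1] (a scan of the first N elements), suf[i] = gcd of A[i..N-1]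
-- (the backward fill = forward scan of the reversed prefix, reversed), then combine per index.
def max_possible_gcd_alt (N : Int) (A : List Int) : Int :=
  let l := A.take N.toNat
  let pre := l.scanl (fun g a => (Int.gcd g a : Int)) 0
  let suf := (l.reverse.scanl (fun g a => (Int.gcd g a : Int)) 0).reverse
  (List.range N.toNat).foldl
    (fun ans i => max ans (Int.gcd (pre.getD i 0) (suf.getD (i + 1) 0))) 1

-- ===== PRECONDITION & SPEC =====
-- A raises IndexError iff N > len(A); nothing else is excluded.
def Pre_max_possible_gcd (N : Int) (A : List Int) : Prop := N ≤ (A.length : Int)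
instance (N : Int) (A : List Int) : Decidable (Pre_max_possible_gcd N A) := by
  unfold Pre_max_possible_gcd; infer_instance

def pvWitness_max_possible_gcd : Int × List Int := (3, [4, 6, 8])

def Spec_max_possible_gcd (N : Int) (A : List Int) (out : Int) : Prop := out = max_possible_gcd_alt N A
instance (N : Int) (A : List Int) (out : Int) : Decidable (Spec_max_possible_gcd N A out) := by
  unfold Spec_max_possible_gcd; infer_instance

-- ===== CLAIM (what is proved, stated in full; the proofs are below) =====
def Claim_equal_max_possible_gcd : Prop := ∀ (N : Int) (A : List Int), Dom_max_possible_gcd N A → Pre_max_possible_gcd N A → Spec_max_possible_gcd N A (max_possible_gcd N A)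

-- ===== LEMMAS AND PROOFS =====

-- fold of pyGcd, the common value language of both proofs
def gfold (z : Int) (xs : List Int) : Int := xs.foldl pyGcd z

-- the leaf values L a, L (a+1), …, L (a+len-1) as a list
def Lrange (L : Nat → Int) (a len : Nat) : List Int := (List.range len).map (fun j => L (a + j))

-- the segment-tree invariant: right length, leaves = L, internal nodes = gcd of children
def GoodTree (num : Nat) (t : List Int) (L : Nat → Int) : Prop :=
  t.length = 2 * num ∧ (∀ i, i < num → t.getD (num + i) 0 = L i) ∧
    (∀ k, 1 ≤ k → k < num → t.getD k 0 = pyGcd (t.getD (2 * k) 0) (t.getD (2 * k + 1) 0))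

-- j is a proper ancestor of k in the heap layout
def ProperAnc (j k : Nat) : Prop := ∃ s, 0 < s ∧ j = k / 2 ^ s

-- ---- pyGcd algebra ----
theorem g_nonneg (x y : Int) : 0 ≤ pyGcd x y := Int.natCast_nonneg _

theorem g_comm (x y : Int) : pyGcd x y = pyGcd y x := by
  simp [pyGcd, Int.gcd, Nat.gcd_comm]

theorem g_assoc (a b c : Int) : pyGcd (pyGcd a b) c = pyGcd a (pyGcd b c) := by
  simp [pyGcd, Int.gcd, Nat.gcd_assoc]

theorem g_absL (a b : Int) : pyGcd (pyGcd 0 a) b = pyGcd a b := by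
  simp [pyGcd, Int.gcd, Int.natAbs_abs]

theorem g_abs0 (a b : Int) : pyGcd 0 (pyGcd a b) = pyGcd a b := by
  simp [pyGcd, Int.gcd]

theorem g_absR (a b : Int) : pyGcd a (pyGcd 0 b) = pyGcd a b := by
  simp [pyGcd, Int.gcd, Int.natAbs_abs]

theorem g_zeroR {c : Int} (h : 0 ≤ c) : pyGcd c 0 = c := by
  simp [pyGcd, Int.gcd]; omega

-- ---- gfold ----
theorem gfold_append (z : Int) (xs ys : List Int) :
    gfold z (xs ++ ys) = gfold (gfold z xs) ys := by
  simp [gfold]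

theorem gfold_nonneg' {z : Int} (h : 0 ≤ z) (xs : List Int) : 0 ≤ gfold z xs := by
  induction xs generalizing z with
  | nil => exact h
  | cons x xs ih => exact ih (g_nonneg z x)

theorem gfold_nonneg (xs : List Int) : 0 ≤ gfold 0 xs := gfold_nonneg' le_rfl xs

theorem gfold_split {z : Int} (h : 0 ≤ z) (xs : List Int) :
    gfold z xs = pyGcd z (gfold 0 xs) := by
  induction xs generalizing z with
  | nil => exact (g_zeroR h).symm
  | cons x xs ih =>
    show gfold (pyGcd z x) xs = pyGcd z (gfold (pyGcd 0 x) xs)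
    rw [ih (g_nonneg z x), ih (g_nonneg 0 x), ← g_assoc, g_absR]

theorem gfold_reverse (xs : List Int) : gfold 0 xs.reverse = gfold 0 xs := by
  induction xs with
  | nil => rfl
  | cons x xs ih =>
    rw [List.reverse_cons, gfold_append, ih]
    show pyGcd (gfold 0 xs) x = gfold (pyGcd 0 x) xs
    rw [gfold_split (g_nonneg 0 x), g_absL, g_comm]

-- ---- Lrange ----
theorem Lrange_zero (L : Nat → Int) (a : Nat) : Lrange L a 0 = [] := rfl

theorem Lrange_one (L : Nat → Int) (a : Nat) : Lrange L a 1 = [L a] := by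
  simp [Lrange]

theorem Lrange_add (L : Nat → Int) (a b c : Nat) :
    Lrange L a (b + c) = Lrange L a b ++ Lrange L (a + b) c := by
  simp only [Lrange, List.range_add, List.map_append, List.map_map]
  congr 1
  apply List.map_congr_left
  intro j _
  simp [Function.comp]
  ring_nf

-- ---- list set/getD ----
theorem set_getD (t : List Int) (i : Nat) (x : Int) (j : Nat) :
    (t.set i x).getD j 0 = if i = j ∧ i < t.length then x else t.getD j 0 := by
  simp only [List.getD_eq_getElem?_getD, List.getElem?_set]
  split_ifs with h1 h2 h3 <;> simp_all <;> omega

-- ---- node cover ----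
theorem node_cover {num : Nat} {t : List Int} {L : Nat → Int} (hg : GoodTree num t L)
    (hnum : 1 ≤ num) :
    ∀ h k, 1 ≤ k → num ≤ k * 2 ^ h → (k + 1) * 2 ^ h ≤ 2 * num →
      pyGcd 0 (t.getD k 0) = gfold 0 (Lrange L (k * 2 ^ h - num) (2 ^ h)) := by
  intro h
  induction h with
  | zero =>
    intro k hk1 hk2 hk3
    simp only [pow_zero, Nat.mul_one] at hk2 hk3 ⊢
    have hkn : k - num < num := by omega
    have hleaf := hg.2.1 (k - num) hkn
    rw [show num + (k - num) = k by omega] at hleaf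
    rw [hleaf, Lrange_one]
    rfl
  | succ h ih =>
    intro k hk1 hk2 hk3
    have hE : (0:Nat) < 2 ^ h := Nat.two_pow_pos h
    have hp : (2:Nat) ^ (h + 1) = 2 ^ h + 2 ^ h := by rw [pow_succ]; ring
    have hknum : k < num := by
      have h1 : k ≤ k * 2 ^ h := Nat.le_mul_of_pos_right k hE
      have h2 : k * 2 ^ h < (k + 1) * 2 ^ h := by
        exact Nat.mul_lt_mul_of_lt_of_le (by omega) le_rfl hE
      have h3 : (k + 1) * 2 ^ h + (k + 1) * 2 ^ h ≤ 2 * num := by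
        calc (k + 1) * 2 ^ h + (k + 1) * 2 ^ h = (k + 1) * 2 ^ (h + 1) := by rw [hp]; ring
        _ ≤ 2 * num := hk3
      omega
    have hint := hg.2.2 k hk1 hknum
    rw [hint]
    have c1 : pyGcd 0 (t.getD (2 * k) 0) =
        gfold 0 (Lrange L (2 * k * 2 ^ h - num) (2 ^ h)) := by
      apply ih (2 * k) (by omega)
      · calc num ≤ k * 2 ^ (h + 1) := hk2
          _ = 2 * k * 2 ^ h := by rw [pow_succ]; ring
      · calc (2 * k + 1) * 2 ^ h ≤ (2 * k + 2) * 2 ^ h := by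
              apply Nat.mul_le_mul_right
              omega
          _ = (k + 1) * 2 ^ (h + 1) := by rw [pow_succ]; ring
          _ ≤ 2 * num := hk3
    have c2 : pyGcd 0 (t.getD (2 * k + 1) 0) =
        gfold 0 (Lrange L ((2 * k + 1) * 2 ^ h - num) (2 ^ h)) := by
      apply ih (2 * k + 1) (by omega)
      · calc num ≤ k * 2 ^ (h + 1) := hk2
          _ = 2 * k * 2 ^ h := by rw [pow_succ]; ring
          _ ≤ (2 * k + 1) * 2 ^ h := by
              apply Nat.mul_le_mul_right
              omega
      · calc (2 * k + 1 + 1) * 2 ^ h = (k + 1) * 2 ^ (h + 1) := by rw [pow_succ]; ring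
          _ ≤ 2 * num := hk3
    have hnum2 : num ≤ 2 * k * 2 ^ h := by
      calc num ≤ k * 2 ^ (h + 1) := hk2
        _ = 2 * k * 2 ^ h := by rw [pow_succ]; ring
    have hsplit : Lrange L (k * 2 ^ (h + 1) - num) (2 ^ (h + 1)) =
        Lrange L (2 * k * 2 ^ h - num) (2 ^ h) ++
        Lrange L ((2 * k + 1) * 2 ^ h - num) (2 ^ h) := by
      have e1 : k * (2 ^ h + 2 ^ h) = 2 * k * 2 ^ h := by ring
      have e2 : 2 * k * 2 ^ h + 2 ^ h = (2 * k + 1) * 2 ^ h := by ring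
      rw [hp, Lrange_add]
      congr 2
      · omega
      · omega
    rw [hsplit, gfold_append, gfold_split (gfold_nonneg _), ← c1, ← c2, g_abs0, g_absL, g_absR]

-- ---- build ----
theorem buildLeaves_aux (A : List Int) (num : Nat) :
    ∀ (c : Nat) (t0 : List Int), c ≤ num → t0.length = 2 * num →
      ((List.range c).foldl (fun t i => t.set (num + i) (A.getD i 0)) t0).length = 2 * num ∧
      (∀ j, ((List.range c).foldl (fun t i => t.set (num + i) (A.getD i 0)) t0).getD j 0 =
        if num ≤ j ∧ j < num + c then A.getD (j - num) 0 else t0.getD j 0) := by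
  intro c
  induction c with
  | zero =>
    intro t0 _ hl
    refine ⟨hl, fun j => ?_⟩
    rw [if_neg (by omega)]
    rfl
  | succ c ih =>
    intro t0 hc hl
    rw [List.range_succ, List.foldl_append]
    obtain ⟨hl', hv⟩ := ih t0 (by omega) hl
    simp only [List.foldl_cons, List.foldl_nil]
    constructor
    · simpa using hl'
    · intro j
      rw [set_getD, hl']
      by_cases hj : num + c = j
      · subst hj
        rw [if_pos ⟨rfl, by omega⟩, if_pos (by omega)]
        congr 1
        omega
      · rw [if_neg (by omega), hv]
        by_cases h2 : num ≤ j ∧ j < num + c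
        · rw [if_pos h2, if_pos (by omega)]
        · rw [if_neg h2, if_neg (by omega)]

theorem buildLeaves_length (A : List Int) (num : Nat) (hn : A.length ≤ num) :
    (segBuildLeaves A num).length = 2 * num :=
  (buildLeaves_aux A num A.length (List.replicate (2 * num) 0) hn (by simp)).1

theorem buildLeaves_getD (A : List Int) (num : Nat) (hn : A.length ≤ num) (j : Nat) :
    (segBuildLeaves A num).getD j 0 =
      if num ≤ j ∧ j < num + A.length then A.getD (j - num) 0 else 0 := by
  rw [segBuildLeaves,
    (buildLeaves_aux A num A.length (List.replicate (2 * num) 0) hn (by simp)).2 j]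
  split_ifs
  · rfl
  · simp [List.getD]

theorem buildLoop_spec (num : Nat) :
    ∀ (i : Nat) (t : List Int), i < num → t.length = 2 * num →
      (segBuildLoop t i).length = 2 * num ∧
      (∀ j, j = 0 ∨ i < j → (segBuildLoop t i).getD j 0 = t.getD j 0) ∧
      (∀ k, 1 ≤ k → k ≤ i →
        (segBuildLoop t i).getD k 0 =
          pyGcd ((segBuildLoop t i).getD (2 * k) 0) ((segBuildLoop t i).getD (2 * k + 1) 0)) := by
  intro i
  induction i with
  | zero =>
    intro t _ hl
    exact ⟨hl, fun j _ => rfl, fun k h1 h2 => absurd (Nat.le_trans h1 h2) (by omega)⟩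
  | succ i ih =>
    intro t hi hl
    rw [segBuildLoop]
    set v := pyGcd (t.getD (2 * (i + 1)) 0) (t.getD (2 * (i + 1) + 1) 0) with hv
    set t' := t.set (i + 1) v with ht'
    have hl' : t'.length = 2 * num := by simp [ht', hl]
    obtain ⟨rl, ra, rb⟩ := ih t' (by omega) hl'
    have hsame : ∀ j, j = 0 ∨ i + 1 < j → (segBuildLoop t' i).getD j 0 = t.getD j 0 := by
      intro j hj
      rw [ra j (by omega), ht', set_getD]
      rw [if_neg (by omega)]
    refine ⟨rl, hsame, ?_⟩
    intro k h1 h2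
    rcases Nat.lt_or_ge k (i + 1) with hk | hk
    · exact rb k h1 (by omega)
    · have hk1 : k = i + 1 := by omega
      subst hk1
      have e1 : (segBuildLoop t' i).getD (i + 1) 0 = v := by
        rw [ra (i + 1) (by omega), ht', set_getD, if_pos ⟨rfl, by omega⟩]
      have e2 : (segBuildLoop t' i).getD (2 * (i + 1)) 0 = t.getD (2 * (i + 1)) 0 :=
        hsame _ (by omega)
      have e3 : (segBuildLoop t' i).getD (2 * (i + 1) + 1) 0 = t.getD (2 * (i + 1) + 1) 0 :=
        hsame _ (by omega)
      rw [e1, e2, e3]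

theorem build_good (A : List Int) (num : Nat) (hn : A.length ≤ num) (hnum : 1 ≤ num) :
    GoodTree num (segBuildLoop (segBuildLeaves A num) (num - 1)) (fun i => A.getD i 0) := by
  obtain ⟨rl, ra, rb⟩ := buildLoop_spec num (num - 1) (segBuildLeaves A num) (by omega)
    (buildLeaves_length A num hn)
  refine ⟨rl, ?_, ?_⟩
  · intro i hi
    rw [ra (num + i) (by omega), buildLeaves_getD A num hn]
    by_cases h : i < A.length
    · rw [if_pos (by omega)]
      congr 1
      omega
    · rw [if_neg (by omega)]
      exact (List.getD_eq_default _ _ (by omega)).symm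
  · intro k h1 h2
    exact rb k h1 (by omega)

-- ---- update ----
theorem xor_even (q : Nat) : (2 * q) ^^^ 1 = 2 * q + 1 := by
  apply Nat.eq_of_testBit_eq; intro i
  rw [Nat.testBit_xor]
  cases i with
  | zero => simp [Nat.testBit_zero]
  | succ i =>
    have h1 : 2 * q / 2 = q := by omega
    have h2 : (2 * q + 1) / 2 = q := by omega
    simp [Nat.testBit_succ, h1, h2]

theorem xor_odd (q : Nat) : (2 * q + 1) ^^^ 1 = 2 * q := by
  apply Nat.eq_of_testBit_eq; intro i
  rw [Nat.testBit_xor]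
  cases i with
  | zero => simp [Nat.testBit_zero]
  | succ i =>
    have h1 : 2 * q / 2 = q := by omega
    have h2 : (2 * q + 1) / 2 = q := by omega
    simp [Nat.testBit_succ, h1, h2]

theorem anc_one (j : Nat) (h : ProperAnc j 1) : j = 0 := by
  obtain ⟨s, hs, rfl⟩ := h
  have : (2:Nat) ≤ 2 ^ s := by
    calc (2:Nat) = 2 ^ 1 := rfl
    _ ≤ 2 ^ s := Nat.pow_le_pow_right (by norm_num) hs
  exact Nat.div_eq_of_lt (by omega)

theorem anc_step (j k : Nat) (hk : 2 ≤ k) : ProperAnc j k ↔ j = k / 2 ∨ ProperAnc j (k / 2) := by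
  constructor
  · rintro ⟨s, hs, rfl⟩
    cases s with
    | zero => omega
    | succ s =>
      cases s with
      | zero => left; simp
      | succ s =>
        right
        refine ⟨s + 1, by omega, ?_⟩
        rw [Nat.div_div_eq_div_mul]
        congr 1
        rw [pow_succ]
        ring
  · rintro (rfl | ⟨s, hs, rfl⟩)
    · exact ⟨1, one_pos, by simp⟩
    · refine ⟨s + 1, by omega, ?_⟩
      rw [Nat.div_div_eq_div_mul]
      congr 1
      rw [pow_succ]
      ring

-- invariant carried by the update loop: leaves right, internal nodes right off the ancestor path
def UpdInv (num : Nat) (L : Nat → Int) (t : List Int) (k : Nat) : Prop :=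
  t.length = 2 * num ∧ (∀ i, i < num → t.getD (num + i) 0 = L i) ∧
    (∀ j, 1 ≤ j → j < num → ¬ ProperAnc j k →
      t.getD j 0 = pyGcd (t.getD (2 * j) 0) (t.getD (2 * j + 1) 0))

theorem updLoop_good {num : Nat} {L : Nat → Int} :
    ∀ (k : Nat) (t : List Int), 1 ≤ k → k < 2 * num → UpdInv num L t k →
      GoodTree num (segUpdLoop t k) L := by
  intro k
  induction k using Nat.strong_induction_on with
  | _ k ih =>
    intro t hk1 hk2 hinv
    obtain ⟨hL, hleafs, hints⟩ := hinv
    rw [segUpdLoop]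
    by_cases hk : 1 < k
    · rw [dif_pos hk]
      set v := pyGcd (t.getD k 0) (t.getD (k ^^^ 1) 0) with hv
      set t' := t.set (k / 2) v with ht'
      have hlen : t'.length = 2 * num := by simp [ht', hL]
      apply ih (k / 2) (by omega) t' (by omega) (by omega)
      refine ⟨hlen, ?_, ?_⟩
      · intro i hi
        rw [ht', set_getD, if_neg (by omega)]
        exact hleafs i hi
      · intro j hj1 hj2 hanc
        have hne : j ≠ k / 2 ∨ j = k / 2 := by tauto
        by_cases hj : j = k / 2
        · subst hj
          have hchild : t'.getD (2 * (k / 2)) 0 = t.getD (2 * (k / 2)) 0 := by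
            rw [ht', set_getD, if_neg (by omega)]
          have hchild2 : t'.getD (2 * (k / 2) + 1) 0 = t.getD (2 * (k / 2) + 1) 0 := by
            rw [ht', set_getD, if_neg (by omega)]
          have hself : t'.getD (k / 2) 0 = v := by
            rw [ht', set_getD, if_pos ⟨rfl, by omega⟩]
          rw [hself, hchild, hchild2, hv]
          -- {k, k ^^^ 1} = {2*(k/2), 2*(k/2)+1}
          rcases Nat.even_or_odd k with he | ho
          · obtain ⟨q, hq⟩ := he
            have hqk : k = 2 * q := by omega
            subst hqk
            rw [xor_even]
            congr 1 <;> [skip; skip] <;> congr 1 <;> omega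
          · obtain ⟨q, hq⟩ := ho
            subst hq
            rw [xor_odd, g_comm]
            congr 2 <;> omega
        · have hnanck : ¬ ProperAnc j k := by
            rw [anc_step j k (by omega)]
            tauto
          have e0 : t'.getD j 0 = t.getD j 0 := by
            rw [ht', set_getD, if_neg (by omega)]
          have e1 : t'.getD (2 * j) 0 = t.getD (2 * j) 0 := by
            rw [ht', set_getD]
            rw [if_neg ?_]
            rintro ⟨h21, -⟩
            exact hanc ⟨1, one_pos, by omega⟩
          have e2 : t'.getD (2 * j + 1) 0 = t.getD (2 * j + 1) 0 := by
            rw [ht', set_getD]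
            rw [if_neg ?_]
            rintro ⟨h21, -⟩
            exact hanc ⟨1, one_pos, by omega⟩
          rw [e0, e1, e2]
          exact hints j hj1 hj2 hnanck
    · rw [dif_neg hk]
      have hk1' : k = 1 := by omega
      subst hk1'
      refine ⟨hL, hleafs, ?_⟩
      intro j hj1 hj2
      apply hints j hj1 hj2
      intro hanc
      have := anc_one j hanc
      omega

theorem update_good {num : Nat} {t : List Int} {L : Nat → Int} (hg : GoodTree num t L)
    (hnum : 1 ≤ num) {i : Nat} (hi : i < num) (x : Int) :
    GoodTree num (segUpdate num t i x) (fun j => if j = i then x else L j) := by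
  have hLen := hg.1
  apply updLoop_good (i + num) _ (by omega) (by omega)
  have hlen : (t.set (i + num) x).length = 2 * num := by simp [hLen]
  refine ⟨hlen, ?_, ?_⟩
  · intro i' hi'
    show (t.set (i + num) x).getD (num + i') 0 = if i' = i then x else L i'
    rw [set_getD]
    by_cases h : i' = i
    · subst h
      rw [if_pos ⟨by omega, by omega⟩, if_pos rfl]
    · rw [if_neg (by omega), if_neg h]
      exact hg.2.1 i' hi'
  · intro j hj1 hj2 hanc
    have e0 : (t.set (i + num) x).getD j 0 = t.getD j 0 := by
      rw [set_getD, if_neg (by omega)]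
    have e1 : (t.set (i + num) x).getD (2 * j) 0 = t.getD (2 * j) 0 := by
      rw [set_getD]
      rw [if_neg ?_]
      rintro ⟨h21, -⟩
      exact hanc ⟨1, one_pos, by omega⟩
    have e2 : (t.set (i + num) x).getD (2 * j + 1) 0 = t.getD (2 * j + 1) 0 := by
      rw [set_getD]
      rw [if_neg ?_]
      rintro ⟨h21, -⟩
      exact hanc ⟨1, one_pos, by omega⟩
    rw [e0, e1, e2]
    exact hg.2.2 j hj1 hj2

-- ---- query ----
theorem split_fold (Xs Ys : List Int) :
    gfold 0 (Xs ++ Ys) = pyGcd (gfold 0 Xs) (gfold 0 Ys) := by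
  rw [gfold_append, gfold_split (gfold_nonneg _)]

theorem absorb_left (P S X Q : Int) (hQ : pyGcd 0 X = Q) :
    pyGcd (pyGcd P S) X = pyGcd (pyGcd P Q) S := by
  rw [← hQ]
  simp only [pyGcd, Int.gcd, Int.natAbs_natCast, Int.natAbs_zero, Nat.gcd_zero_left]
  congr 1
  rw [Nat.gcd_assoc, Nat.gcd_comm S.natAbs, ← Nat.gcd_assoc]

theorem absorb_right (P S Y Q : Int) (hQ : pyGcd 0 Y = Q) :
    pyGcd (pyGcd P S) Y = pyGcd P (pyGcd Q S) := by
  rw [← hQ]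
  simp only [pyGcd, Int.gcd, Int.natAbs_natCast, Int.natAbs_zero, Nat.gcd_zero_left]
  congr 1
  rw [Nat.gcd_assoc, Nat.gcd_comm S.natAbs]

theorem qloop_inv {num m : Nat} {t : List Int} {L : Nat → Int} (hg : GoodTree num t L)
    (hnum : 1 ≤ num) (hm : m ≤ num) :
    ∀ (r : Nat), ∀ (l h : Nat) (res : Int), l ≤ r → num ≤ l * 2 ^ h → r * 2 ^ h ≤ num + m →
      res = pyGcd (gfold 0 (Lrange L 0 (l * 2 ^ h - num)))
                  (gfold 0 (Lrange L (r * 2 ^ h - num) (m - (r * 2 ^ h - num)))) →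
      segQLoop t res l r = gfold 0 (Lrange L 0 m) := by
  intro r
  induction r using Nat.strong_induction_on with
  | _ r ih =>
    intro l h res hlr hl hr hres
    have hE : (0:Nat) < 2 ^ h := Nat.two_pow_pos h
    by_cases hcond : l < r
    · rw [segQLoop, dif_pos hcond]
      have hl1 : 1 ≤ l := by
        rcases Nat.eq_zero_or_pos l with h0 | h1
        · subst h0; simp at hl; omega
        · exact h1
      have hr2 : 2 ≤ r := by omega
      have hlE : l * 2 ^ h < r * 2 ^ h := Nat.mul_lt_mul_of_lt_of_le hcond le_rfl hE
      -- the two node values possibly absorbed this round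
      have hpow : (2:Nat) ^ (h + 1) = 2 ^ h * 2 := pow_succ 2 h
      -- reduce the lets according to the two parities
      have hc2m : r * 2 ^ h - num ≤ m := by omega
      have hpowmul : ∀ a : Nat, a * 2 ^ (h + 1) = a * 2 * 2 ^ h := by
        intro a
        rw [hpow]
        ring
      by_cases hlp : l % 2 = 1 <;> by_cases hrp : r % 2 = 1 <;>
        simp only [hlp, hrp, reduceIte, if_true, if_false, if_pos, if_neg]
      · -- l odd, r odd
        have hl1r : l + 1 ≤ r := by omega
        have hEl : l * 2 ^ h + 2 ^ h = (l + 1) * 2 ^ h := by ring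
        have hEr : (r - 1) * 2 ^ h + 2 ^ h = r * 2 ^ h := by
          calc (r - 1) * 2 ^ h + 2 ^ h = (r - 1 + 1) * 2 ^ h := by ring
            _ = r * 2 ^ h := by rw [show r - 1 + 1 = r by omega]
        have hlc : (l + 1) * 2 ^ h ≤ r * 2 ^ h := Nat.mul_le_mul_right _ hl1r
        have hrc : l * 2 ^ h ≤ (r - 1) * 2 ^ h := Nat.mul_le_mul_right _ (by omega)
        have hnl := node_cover hg hnum h l hl1 hl (by omega)
        have hnr := node_cover hg hnum h (r - 1) (by omega) (by omega)
          (by rw [show r - 1 + 1 = r by omega]; omega)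
        have hres2 : pyGcd (pyGcd res (t.getD l 0)) (t.getD (r - 1) 0)
            = pyGcd (gfold 0 (Lrange L 0 ((l + 1) * 2 ^ h - num)))
                    (gfold 0 (Lrange L ((r - 1) * 2 ^ h - num)
                      (m - ((r - 1) * 2 ^ h - num)))) := by
          rw [hres, absorb_left _ _ _ _ hnl, absorb_right _ _ _ _ hnr]
          congr 1
          · rw [show (l + 1) * 2 ^ h - num = (l * 2 ^ h - num) + 2 ^ h by omega,
              Lrange_add, split_fold, Nat.zero_add]
          · rw [show m - ((r - 1) * 2 ^ h - num) = 2 ^ h + (m - (r * 2 ^ h - num)) by omega,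
              Lrange_add, split_fold, show (r - 1) * 2 ^ h - num + 2 ^ h = r * 2 ^ h - num by omega]
        have e1 : (l + 1) / 2 * 2 = l + 1 := by omega
        have eL : (l + 1) / 2 * 2 ^ (h + 1) = (l + 1) * 2 ^ h := by rw [hpowmul, e1]
        have e2 : r / 2 * 2 = r - 1 := by omega
        have eR : r / 2 * 2 ^ (h + 1) = (r - 1) * 2 ^ h := by rw [hpowmul, e2]
        exact ih (r / 2) (Nat.div_lt_self (by omega) one_lt_two) ((l + 1) / 2) (h + 1) _
          (by omega) (by rw [eL]; omega) (by rw [eR]; omega) (by rw [eL, eR]; exact hres2)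
      · -- l odd, r even
        have hl1r : l + 1 ≤ r := by omega
        have hEl : l * 2 ^ h + 2 ^ h = (l + 1) * 2 ^ h := by ring
        have hlc : (l + 1) * 2 ^ h ≤ r * 2 ^ h := Nat.mul_le_mul_right _ hl1r
        have hnl := node_cover hg hnum h l hl1 hl (by omega)
        have hres2 : pyGcd res (t.getD l 0)
            = pyGcd (gfold 0 (Lrange L 0 ((l + 1) * 2 ^ h - num)))
                    (gfold 0 (Lrange L (r * 2 ^ h - num) (m - (r * 2 ^ h - num)))) := by
          rw [hres, absorb_left _ _ _ _ hnl]
          congr 1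
          rw [show (l + 1) * 2 ^ h - num = (l * 2 ^ h - num) + 2 ^ h by omega,
            Lrange_add, split_fold, Nat.zero_add]
        have e1 : (l + 1) / 2 * 2 = l + 1 := by omega
        have eL : (l + 1) / 2 * 2 ^ (h + 1) = (l + 1) * 2 ^ h := by rw [hpowmul, e1]
        have e2 : r / 2 * 2 = r := by omega
        have eR : r / 2 * 2 ^ (h + 1) = r * 2 ^ h := by rw [hpowmul, e2]
        exact ih (r / 2) (Nat.div_lt_self (by omega) one_lt_two) ((l + 1) / 2) (h + 1) _
          (by omega) (by rw [eL]; omega) (by rw [eR]; omega) (by rw [eL, eR]; exact hres2)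
      · -- l even, r odd
        have hEr : (r - 1) * 2 ^ h + 2 ^ h = r * 2 ^ h := by
          calc (r - 1) * 2 ^ h + 2 ^ h = (r - 1 + 1) * 2 ^ h := by ring
            _ = r * 2 ^ h := by rw [show r - 1 + 1 = r by omega]
        have hrc : l * 2 ^ h ≤ (r - 1) * 2 ^ h := Nat.mul_le_mul_right _ (by omega)
        have hnr := node_cover hg hnum h (r - 1) (by omega) (by omega)
          (by rw [show r - 1 + 1 = r by omega]; omega)
        have hres2 : pyGcd res (t.getD (r - 1) 0)
            = pyGcd (gfold 0 (Lrange L 0 (l * 2 ^ h - num)))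
                    (gfold 0 (Lrange L ((r - 1) * 2 ^ h - num)
                      (m - ((r - 1) * 2 ^ h - num)))) := by
          rw [hres, absorb_right _ _ _ _ hnr]
          congr 1
          rw [show m - ((r - 1) * 2 ^ h - num) = 2 ^ h + (m - (r * 2 ^ h - num)) by omega,
            Lrange_add, split_fold, show (r - 1) * 2 ^ h - num + 2 ^ h = r * 2 ^ h - num by omega]
        have e1 : l / 2 * 2 = l := by omega
        have eL : l / 2 * 2 ^ (h + 1) = l * 2 ^ h := by rw [hpowmul, e1]
        have e2 : r / 2 * 2 = r - 1 := by omega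
        have eR : r / 2 * 2 ^ (h + 1) = (r - 1) * 2 ^ h := by rw [hpowmul, e2]
        exact ih (r / 2) (Nat.div_lt_self (by omega) one_lt_two) (l / 2) (h + 1) _
          (by omega) (by rw [eL]; omega) (by rw [eR]; omega) (by rw [eL, eR]; exact hres2)
      · -- l even, r even
        have e1 : l / 2 * 2 = l := by omega
        have eL : l / 2 * 2 ^ (h + 1) = l * 2 ^ h := by rw [hpowmul, e1]
        have e2 : r / 2 * 2 = r := by omega
        have eR : r / 2 * 2 ^ (h + 1) = r * 2 ^ h := by rw [hpowmul, e2]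
        exact ih (r / 2) (Nat.div_lt_self (by omega) one_lt_two) (l / 2) (h + 1) _
          (by omega) (by rw [eL]; omega) (by rw [eR]; omega) (by rw [eL, eR]; exact hres)
    · rw [segQLoop, dif_neg hcond]
      have hlr' : l = r := by omega
      subst hlr'
      have hc2 : l * 2 ^ h - num ≤ m := by omega
      rw [hres, show m = (l * 2 ^ h - num) + (m - (l * 2 ^ h - num)) by omega,
        Lrange_add, split_fold]
      simp

theorem query_call {num m : Nat} {t : List Int} {L : Nat → Int} (hg : GoodTree num t L)
    (hnum : 1 ≤ num) (hm : m ≤ num) :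
    segQLoop t 0 (0 + num) (m + num) = gfold 0 (Lrange L 0 m) := by
  apply qloop_inv hg hnum hm (m + num) (0 + num) 0 0 (by omega) (by simp)
    (by simp only [pow_zero, Nat.mul_one]; omega)
  have e1 : (0 + num) * 2 ^ 0 - num = 0 := by simp
  have e2 : (m + num) * 2 ^ 0 - num = m := by simp
  rw [e1, e2, Nat.sub_self, Lrange_zero, Lrange_zero]
  rfl

-- ---- main loop ----
theorem main_loop (A : List Int) (num m : Nat) (hm : m ≤ num) (hnum : 1 ≤ num) :
    ∀ (ks : List Nat) (t : List Int) (ans : Int), GoodTree num t (fun i => A.getD i 0) →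
      (∀ i ∈ ks, i < m) →
      ((ks.foldl
        (fun (st : List Int × Int) i =>
          let t1 := segUpdate num st.1 i 0
          let a := max st.2 (segQLoop t1 0 (0 + num) (m + num))
          let t2 := segUpdate num t1 i (A.getD i 0)
          (t2, a))
        (t, ans)).2 =
       ks.foldl (fun a i =>
          max a (gfold 0 (Lrange (fun j => if j = i then 0 else A.getD j 0) 0 m))) ans) := by
  intro ks
  induction ks with
  | nil => intro t ans _ _; rfl
  | cons i ks ihk =>
    intro t ans hgt hmem
    have hi : i < m := hmem i List.mem_cons_self
    have hg1 : GoodTree num (segUpdate num t i 0)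
        (fun j => if j = i then 0 else A.getD j 0) := by
      exact update_good hgt hnum (lt_of_lt_of_le hi hm) 0
    have hq := query_call hg1 hnum hm
    have hg2 : GoodTree num (segUpdate num (segUpdate num t i 0) i (A.getD i 0))
        (fun j => A.getD j 0) := by
      have h2 := update_good hg1 hnum (lt_of_lt_of_le hi hm) (A.getD i 0)
      have hfe : (fun j => if j = i then A.getD i 0
          else if j = i then (0:Int) else A.getD j 0) = (fun j => A.getD j 0) := by
        funext j
        by_cases hj : j = i <;> simp [hj]
      rwa [hfe] at h2
    rw [List.foldl_cons, List.foldl_cons]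
    show (List.foldl
        (fun (st : List Int × Int) i =>
          let t1 := segUpdate num st.1 i 0
          let a := max st.2 (segQLoop t1 0 (0 + num) (m + num))
          let t2 := segUpdate num t1 i (A.getD i 0)
          (t2, a))
        (segUpdate num (segUpdate num t i 0) i (A.getD i 0),
         max ans (segQLoop (segUpdate num t i 0) 0 (0 + num) (m + num))) ks).2 = _
    rw [hq]
    exact ihk _ _ hg2 (fun j hj => hmem j (List.mem_cons_of_mem _ hj))

-- ---- B side ----
theorem scanl_getD (f : Int → Int → Int) :
    ∀ (xs : List Int) (z : Int) (i : Nat), i ≤ xs.length →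
      (List.scanl f z xs).getD i 0 = (xs.take i).foldl f z := by
  intro xs
  induction xs with
  | nil =>
    intro z i hi
    have : i = 0 := by simpa using hi
    subst this
    rfl
  | cons x xs ih =>
    intro z i hi
    cases i with
    | zero => simp [List.scanl_cons]
    | succ i =>
      rw [List.scanl_cons]
      show (List.scanl f (f z x) xs).getD i 0 = _
      rw [ih (f z x) i (by simpa using hi)]
      rfl

theorem foldl_max_congr (f g : Nat → Int) :
    ∀ (ks : List Nat) (a : Int), (∀ i ∈ ks, f i = g i) →
      ks.foldl (fun a i => max a (f i)) a = ks.foldl (fun a i => max a (g i)) a := by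
  intro ks
  induction ks with
  | nil => intro a _; rfl
  | cons i ks ihk =>
    intro a h
    rw [List.foldl_cons, List.foldl_cons, h i List.mem_cons_self]
    exact ihk _ (fun j hj => h j (List.mem_cons_of_mem _ hj))

-- the per-index value: gcd of the first m elements with the i-th zeroed
theorem term_eq (A : List Int) (m : Nat) (hmn : m ≤ A.length) (i : Nat) (hi : i < m) :
    gfold 0 (Lrange (fun j => if j = i then 0 else A.getD j 0) 0 m) =
      pyGcd (gfold 0 ((A.take m).take i)) (gfold 0 ((A.take m).drop (i + 1))) := by
  have hlen : (A.take m).length = m := by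
    rw [List.length_take]
    omega
  have h1 : Lrange (fun j => if j = i then 0 else A.getD j 0) 0 i = (A.take m).take i := by
    apply List.ext_getElem
    · simp [Lrange]
      omega
    · intro j hj1 hj2
      simp only [Lrange, List.getElem_map, List.getElem_range, List.getElem_take]
      have hj : j < i := by simpa [Lrange] using hj1
      rw [if_neg (by omega), Nat.zero_add, List.getD_eq_getElem A 0 (by omega)]
  have h2 : Lrange (fun j => if j = i then 0 else A.getD j 0) (i + 1) (m - (i + 1)) =
      (A.take m).drop (i + 1) := by
    apply List.ext_getElem
    · simp [Lrange]
      omega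
    · intro j hj1 hj2
      simp only [Lrange, List.getElem_map, List.getElem_range, List.getElem_drop]
      have hj : j < m - (i + 1) := by simpa [Lrange] using hj1
      rw [if_neg (by omega), List.getElem_take, List.getD_eq_getElem A 0 (by omega)]
  have hfull : Lrange (fun j => if j = i then 0 else A.getD j 0) 0 m =
      (A.take m).take i ++ ([0] ++ (A.take m).drop (i + 1)) := by
    conv_lhs => rw [show m = i + (1 + (m - (i + 1))) by omega]
    rw [Lrange_add, show (0:Nat) + i = i by omega, Lrange_add, Lrange_one, if_pos rfl, h1, h2]
  rw [hfull, split_fold]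
  congr 1

theorem bitLength_bound (n : Nat) : n ≤ 2 ^ pyBitLength ((n : Int) - 1).natAbs := by
  cases n with
  | zero => norm_num [pyBitLength, Nat.log2]
  | succ n =>
    have h1 : ((n + 1 : Nat) : Int) - 1 = (n : Int) := by push_cast; ring
    rw [h1, Int.natAbs_natCast]
    cases Nat.eq_zero_or_pos n with
    | inl h => subst h; norm_num [pyBitLength]
    | inr h =>
      unfold pyBitLength
      rw [if_neg (by omega)]
      exact Nat.lt_log2_self

-- B computes, at index i, gcd(prefix) ∘ gcd(suffix) of the first N elements
theorem alt_eq (N : Int) (A : List Int) (hmn : N.toNat ≤ A.length) :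
    max_possible_gcd_alt N A =
      (List.range N.toNat).foldl (fun a i =>
        max a (pyGcd (gfold 0 ((A.take N.toNat).take i))
                     (gfold 0 ((A.take N.toNat).drop (i + 1))))) 1 := by
  have hlen : (A.take N.toNat).length = N.toNat := by
    rw [List.length_take]
    omega
  show (List.range N.toNat).foldl (fun ans i =>
      max ans ((Int.gcd (((A.take N.toNat).scanl (fun g a => (Int.gcd g a : Int)) 0).getD i 0)
        ((((A.take N.toNat).reverse.scanl (fun g a => (Int.gcd g a : Int)) 0).reverse).getD
          (i + 1) 0) : Int))) 1 = _
  apply foldl_max_congr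
  intro i hi
  have him : i < N.toNat := by simpa using hi
  have hpre : ((A.take N.toNat).scanl (fun g a => (Int.gcd g a : Int)) 0).getD i 0 =
      gfold 0 ((A.take N.toNat).take i) := by
    rw [scanl_getD _ _ 0 i (by omega)]
    rfl
  have hrevlen : (A.take N.toNat).reverse.length = N.toNat := by simp [hlen]
  have hslen : ((A.take N.toNat).reverse.scanl (fun g a => (Int.gcd g a : Int)) 0).length
      = N.toNat + 1 := by
    rw [List.length_scanl, hrevlen]
  have hsuf : (((A.take N.toNat).reverse.scanl (fun g a => (Int.gcd g a : Int)) 0).reverse).getD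
      (i + 1) 0 = gfold 0 ((A.take N.toNat).drop (i + 1)) := by
    rw [List.getD_eq_getElem?_getD,
      List.getElem?_reverse (by rw [hslen]; omega), hslen]
    rw [show N.toNat + 1 - 1 - (i + 1) = N.toNat - (i + 1) by omega]
    rw [← List.getD_eq_getElem?_getD, scanl_getD _ _ 0 _ (by rw [hrevlen]; omega)]
    show gfold 0 ((A.take N.toNat).reverse.take (N.toNat - (i + 1))) = _
    rw [List.take_reverse, hlen,
      show N.toNat - (N.toNat - (i + 1)) = i + 1 by omega, gfold_reverse]
  rw [hpre, hsuf]
  rfl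

theorem max_possible_gcd_spec : Claim_equal_max_possible_gcd := by
  intro N A _ hpre
  show max_possible_gcd N A = max_possible_gcd_alt N A
  have hmn : N.toNat ≤ A.length := by
    unfold Pre_max_possible_gcd at hpre
    omega
  have hnn : A.length ≤ 2 ^ pyBitLength ((A.length : Int) - 1).natAbs :=
    bitLength_bound A.length
  have hnum1 : (1:Nat) ≤ 2 ^ pyBitLength ((A.length : Int) - 1).natAbs :=
    Nat.one_le_two_pow
  have hA : max_possible_gcd N A =
      (List.range N.toNat).foldl (fun a i =>
        max a (gfold 0 (Lrange (fun j => if j = i then 0 else A.getD j 0) 0 N.toNat))) 1 := by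
    show ((List.range N.toNat).foldl
        (fun (st : List Int × Int) i =>
          let t1 := segUpdate (2 ^ pyBitLength ((A.length : Int) - 1).natAbs) st.1 i 0
          let a := max st.2 (segQLoop t1 0 (0 + 2 ^ pyBitLength ((A.length : Int) - 1).natAbs)
            (N.toNat + 2 ^ pyBitLength ((A.length : Int) - 1).natAbs))
          let t2 := segUpdate (2 ^ pyBitLength ((A.length : Int) - 1).natAbs) t1 i (A.getD i 0)
          (t2, a))
        (segBuildLoop (segBuildLeaves A (2 ^ pyBitLength ((A.length : Int) - 1).natAbs))
          ((2 ^ pyBitLength ((A.length : Int) - 1).natAbs) - 1), 1)).2 = _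
    exact main_loop A _ N.toNat (le_trans hmn hnn) hnum1 (List.range N.toNat) _ 1
      (build_good A _ hnn hnum1) (by intro i hi; simpa using hi)
  rw [hA, alt_eq N A hmn]
  apply foldl_max_congr
  intro i hi
  exact term_eq A N.toNat hmn i (by simpa using hi)
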